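-- pv_equiv track=rewrite | github.com/Rqph/Codage_Hauffman_et_Anaylse_Image | codage.py | rech_supsymb
-- ===== SOURCE A (Python) =====
-- def rech_supsymb(liste):
--     minimum = 1
--     calc = 0
--     couple_indice = [0,1]
--     for i in range(len(liste)):
--         a = liste[i]
--         idx = 0
--         while (idx != len(liste)):
--             if idx != i :
--                 b = liste[idx]
--                 calc = a+b
--                 if (minimum > calc) :
--                     minimum = calc
--                     couple_indice = [i,idx]
--             idx+=1
--     return (couple_indice,minimum)
-- ===== SOURCE B (Python) =====
-- def rech_supsymb(liste):
--     n = len(liste)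
--     if n < 2:
--         return ([0, 1], 1)
--     # one pass: two smallest values with their first positions
--     m1, p1 = liste[0], 0
--     m2, p2 = liste[1], 1
--     if m2 < m1:
--         m1, p1, m2, p2 = m2, 1, m1, 0
--     for i in range(2, n):
--         v = liste[i]
--         if v < m1:
--             m1, p1, m2, p2 = v, i, m1, p1
--         elif v < m2:
--             m2, p2 = v, i
--     s = m1 + m2
--     if s < 1:
--         return ([min(p1, p2), max(p1, p2)], s)
--     return ([0, 1], 1)
-- ===== Notes on version B (the rewrite author's own statement) =====
-- stated objective: faster
-- what changed: Replaced the nested all-ordered-pairs scan by a single pass that tracks the two smallest values with their first positions; the answer pair is the sorted pair of those two positions, reproducing the nested loop's lexicographic tie-break and the <1 threshold.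
import Mathlib
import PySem

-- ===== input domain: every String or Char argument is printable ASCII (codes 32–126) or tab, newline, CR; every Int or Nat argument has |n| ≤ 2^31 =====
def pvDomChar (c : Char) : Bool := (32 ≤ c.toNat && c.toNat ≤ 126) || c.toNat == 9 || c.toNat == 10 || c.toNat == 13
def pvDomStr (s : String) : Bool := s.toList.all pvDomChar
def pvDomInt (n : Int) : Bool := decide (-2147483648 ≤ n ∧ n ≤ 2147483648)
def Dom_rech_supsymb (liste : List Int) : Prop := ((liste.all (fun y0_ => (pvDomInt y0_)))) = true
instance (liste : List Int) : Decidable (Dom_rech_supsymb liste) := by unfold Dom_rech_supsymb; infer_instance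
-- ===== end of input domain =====

-- B replaces A's O(n^2) scan over all ordered index pairs by a single O(n) pass tracking the
-- two smallest values with their first positions (same return value, including tie-breaks).

-- ===== PORT A =====
def rech_supsymb (liste : List Int) : List Int × Int :=
  let n : Int := liste.length
  let s := (PySem.List.pyRange 0 n 1).foldl (fun (s : Int × List Int) i =>
      let a := PySem.List.pyGetD liste i 0
      (PySem.List.pyRange 0 n 1).foldl (fun (s : Int × List Int) idx =>
          if idx ≠ i then
            let b := PySem.List.pyGetD liste idx 0
            let c := a + b
            if s.1 > c then (c, [i, idx]) else s
          else s) s) (1, [0, 1])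
  (s.2, s.1)

-- ===== PORT B =====
def rech_supsymb_alt (liste : List Int) : List Int × Int :=
  let n : Int := liste.length
  if n < 2 then ([0, 1], 1) else
    let m1 := PySem.List.pyGetD liste 0 0
    let m2 := PySem.List.pyGetD liste 1 0
    let init : Int × Int × Int × Int := if m2 < m1 then (m2, 1, m1, 0) else (m1, 0, m2, 1)
    let st := (PySem.List.pyRange 2 n 1).foldl (fun (st : Int × Int × Int × Int) i =>
        let v := PySem.List.pyGetD liste i 0
        if v < st.1 then (v, i, st.1, st.2.1)
        else if v < st.2.2.1 then (st.1, st.2.1, v, i)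
        else st) init
    let s := st.1 + st.2.2.1
    if s < 1 then ([min st.2.1 st.2.2.2, max st.2.1 st.2.2.2], s) else ([0, 1], 1)

-- ===== PRECONDITION & SPEC =====
def Spec_rech_supsymb (liste : List Int) (out : List Int × Int) : Prop := out = rech_supsymb_alt liste
instance (liste : List Int) (out : List Int × Int) : Decidable (Spec_rech_supsymb liste out) := by unfold Spec_rech_supsymb; infer_instance

-- ===== CLAIM (what is proved, stated in full; the proofs are below) =====
def Claim_equal_rech_supsymb : Prop := ∀ (liste : List Int), Dom_rech_supsymb liste → Spec_rech_supsymb liste (rech_supsymb liste)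

-- ===== LEMMAS AND PROOFS =====

-- value at an index (both ports read the list this way)
def gI (xs : List Int) (t : Int) : Int := PySem.List.pyGetD xs t 0

-- generic "keep the strictly better candidate" fold step (shape of A's inner update)
def pvStep (f : Nat → Int) (t : Nat → List Int) (c : Nat → Bool)
    (s : Int × List Int) (q : Nat) : Int × List Int :=
  if c q then (if s.1 > f q then (f q, t q) else s) else s

-- A's flattened candidate data: q ↔ pair (q / n, q % n)
def fA (xs : List Int) (q : Nat) : Int := gI xs (q / xs.length : Nat) + gI xs (q % xs.length : Nat)
def tA (xs : List Int) (q : Nat) : List Int := [((q / xs.length : Nat) : Int), ((q % xs.length : Nat) : Int)]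
def cA (xs : List Int) (q : Nat) : Bool := decide (q % xs.length ≠ q / xs.length)

-- B's scan step, initial state and final state
def bStep (xs : List Int) (st : Int × Int × Int × Int) (i : Int) : Int × Int × Int × Int :=
  let v := gI xs i
  if v < st.1 then (v, i, st.1, st.2.1)
  else if v < st.2.2.1 then (st.1, st.2.1, v, i)
  else st

def bInit (xs : List Int) : Int × Int × Int × Int :=
  if gI xs 1 < gI xs 0 then (gI xs 1, 1, gI xs 0, 0) else (gI xs 0, 0, gI xs 1, 1)

def bState (xs : List Int) : Int × Int × Int × Int :=
  (PySem.List.pyRange 2 (xs.length : Int) 1).foldl (bStep xs) (bInit xs)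

-- B's scan invariant: (m1,p1) = min value with first position, (m2,p2) = min over the
-- other positions with first such position, over the prefix [0,k)
def InvB (xs : List Int) (k : Int) (st : Int × Int × Int × Int) : Prop :=
  0 ≤ st.2.1 ∧ st.2.1 < k ∧ 0 ≤ st.2.2.2 ∧ st.2.2.2 < k ∧ st.2.1 ≠ st.2.2.2 ∧
  st.1 = gI xs st.2.1 ∧ st.2.2.1 = gI xs st.2.2.2 ∧
  (∀ t : Int, 0 ≤ t → t < k → st.1 ≤ gI xs t) ∧
  (∀ t : Int, 0 ≤ t → t < st.2.1 → st.1 < gI xs t) ∧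
  (∀ t : Int, 0 ≤ t → t < k → t ≠ st.2.1 → st.2.2.1 ≤ gI xs t) ∧
  (∀ t : Int, 0 ≤ t → t < st.2.2.2 → t ≠ st.2.1 → st.2.2.1 < gI xs t)

lemma pvFold_lb (f : Nat → Int) (t : Nat → List Int) (c : Nat → Bool) :
    ∀ (m : Nat) (s : Int × List Int) (x : Int), x < s.1 →
      (∀ j, j < m → c j = true → x < f j) →
      x < ((List.range m).foldl (pvStep f t c) s).1 := by
  intro m
  induction m with
  | zero => intro s x hx _; simpa using hx
  | succ m ih =>
      intro s x hx h
      rw [List.range_succ, List.foldl_append]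
      simp only [List.foldl_cons, List.foldl_nil, pvStep]
      split_ifs with hc hlt
      · exact (by simpa using h m (by omega) hc)
      · exact ih s x hx (fun j hj hcj => h j (by omega) hcj)
      · exact ih s x hx (fun j hj hcj => h j (by omega) hcj)

lemma pvFold_none (f : Nat → Int) (t : Nat → List Int) (c : Nat → Bool) :
    ∀ (m : Nat) (s : Int × List Int),
      (∀ j, j < m → c j = true → s.1 ≤ f j) →
      (List.range m).foldl (pvStep f t c) s = s := by
  intro m
  induction m with
  | zero => intro s _; rfl
  | succ m ih =>
      intro s h
      rw [List.range_succ, List.foldl_append]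
      rw [ih s (fun j hj hcj => h j (by omega) hcj)]
      simp only [List.foldl_cons, List.foldl_nil, pvStep]
      split_ifs with hc hlt
      · exact absurd (h m (by omega) hc) (by omega)
      · rfl
      · rfl

lemma pvFold_first (f : Nat → Int) (t : Nat → List Int) (c : Nat → Bool) :
    ∀ (m : Nat) (s : Int × List Int) (j0 : Nat), j0 < m → c j0 = true → f j0 < s.1 →
      (∀ j, j < m → c j = true → f j0 ≤ f j) →
      (∀ j, j < j0 → c j = true → f j0 < f j) →
      (List.range m).foldl (pvStep f t c) s = (f j0, t j0) := by
  intro m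
  induction m with
  | zero => intro s j0 h; omega
  | succ m ih =>
      intro s j0 hj0m hc hlt hmin hfirst
      rw [List.range_succ, List.foldl_append]
      by_cases hcase : j0 = m
      · subst hcase
        have hprev : f j0 < ((List.range j0).foldl (pvStep f t c) s).1 :=
          pvFold_lb f t c j0 s (f j0) hlt (fun j hj hcj => hfirst j hj hcj)
        simp only [List.foldl_cons, List.foldl_nil, pvStep, hc, if_true]
        rw [if_pos (by exact hprev)]
      · have hj0m' : j0 < m := by omega
        rw [ih s j0 hj0m' hc hlt (fun j hj hcj => hmin j (by omega) hcj) hfirst]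
        simp only [List.foldl_cons, List.foldl_nil, pvStep]
        split_ifs with hcm hltm
        · exact absurd (hmin m (by omega) hcm) (by omega)
        · rfl
        · rfl

lemma pvFlatten (h : (Int × List Int) → Nat → Nat → Int × List Int) (n : Nat) (hn : 0 < n) :
    ∀ (m : Nat) (s : Int × List Int),
      (List.range m).foldl (fun s i => (List.range n).foldl (fun s j => h s i j) s) s
        = (List.range (m * n)).foldl (fun s q => h s (q / n) (q % n)) s := by
  intro m
  induction m with
  | zero => intro s; simp
  | succ m ih =>
      intro s
      rw [List.range_succ, List.foldl_append, ih]
      have : (m + 1) * n = m * n + n := by ring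
      rw [this, List.range_add, List.foldl_append, List.foldl_map]
      simp only [List.foldl_cons, List.foldl_nil]
      apply PySem.List.foldl_congr_mem
      intro a j hj
      have hjn : j < n := by simpa using hj
      have hdiv : (m * n + j) / n = m := by
        rw [Nat.add_comm, Nat.mul_comm, Nat.add_mul_div_left _ _ hn, Nat.div_eq_of_lt hjn]; omega
      have hmod : (m * n + j) % n = j := by
        rw [Nat.add_comm, Nat.mul_comm, Nat.add_mul_mod_self_left, Nat.mod_eq_of_lt hjn]
      rw [hdiv, hmod]

-- A in flattened form (length > 0)
lemma A_char (xs : List Int) (hn : 0 < xs.length) :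
    rech_supsymb xs =
      (((List.range (xs.length * xs.length)).foldl (pvStep (fA xs) (tA xs) (cA xs)) (1, [0, 1])).2,
       ((List.range (xs.length * xs.length)).foldl (pvStep (fA xs) (tA xs) (cA xs)) (1, [0, 1])).1) := by
  unfold rech_supsymb
  dsimp only
  simp only [PySem.List.pyRange_zero_nat, List.foldl_map]
  have h1 : (List.range xs.length).foldl
      (fun (s : Int × List Int) (i : Nat) =>
        List.foldl (fun (s : Int × List Int) (j : Nat) =>
            if ((j:Int)) ≠ ((i:Int)) then
              (if s.1 > PySem.List.pyGetD xs (i:Int) 0 + PySem.List.pyGetD xs (j:Int) 0 then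
                (PySem.List.pyGetD xs (i:Int) 0 + PySem.List.pyGetD xs (j:Int) 0, [(i:Int), (j:Int)])
               else s)
            else s) s (List.range xs.length))
      (1, [0,1])
      = (List.range (xs.length * xs.length)).foldl (pvStep (fA xs) (tA xs) (cA xs)) (1, [0, 1]) := by
    rw [pvFlatten _ _ hn]
    apply PySem.List.foldl_congr_mem
    intro s q hq
    simp only [pvStep, fA, tA, cA, gI, decide_eq_true_eq, Ne, Nat.cast_inj]
  rw [← h1]

-- B's invariant holds after the whole scan
lemma inv_init (xs : List Int) : InvB xs 2 (bInit xs) := by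
  unfold InvB bInit
  split_ifs with h
  all_goals dsimp only
  all_goals
    refine ⟨by norm_num, by norm_num, by norm_num, by norm_num, by norm_num, rfl, rfl, ?_, ?_, ?_, ?_⟩
  · intro t ht0 ht2
    have ht : t = 0 ∨ t = 1 := by omega
    rcases ht with rfl | rfl
    · exact le_of_lt h
    · exact le_refl _
  · intro t ht0 ht1
    have ht : t = 0 := by omega
    subst ht; exact h
  · intro t ht0 ht2 htne
    have ht : t = 0 := by omega
    subst ht; exact le_refl _
  · intro t ht0 ht1 htne; omega
  · intro t ht0 ht2
    have ht : t = 0 ∨ t = 1 := by omega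
    rcases ht with rfl | rfl
    · exact le_refl _
    · omega
  · intro t ht0 ht1; omega
  · intro t ht0 ht2 htne
    have ht : t = 1 := by omega
    subst ht; exact le_refl _
  · intro t ht0 ht1 htne
    have ht : t = 0 := by omega
    subst ht; omega

lemma inv_step (xs : List Int) (k : Int) (st : Int × Int × Int × Int)
    (hInv : InvB xs k st) : InvB xs (k + 1) (bStep xs st k) := by
  obtain ⟨h1, h2, h3, h4, h5, h6, h7, h8, h9, h10, h11⟩ := hInv
  unfold bStep
  dsimp only
  split_ifs with hv1 hv2
  all_goals dsimp only [InvB]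
  · -- new minimum at k
    refine ⟨by omega, by omega, by omega, by omega, by omega, rfl, h6, ?_, ?_, ?_, ?_⟩
    · intro t ht0 htk
      rcases (by omega : t < k ∨ t = k) with h | h
      · exact le_of_lt (lt_of_lt_of_le hv1 (h8 t ht0 h))
      · subst h; exact le_refl _
    · intro t ht0 htk
      exact lt_of_lt_of_le hv1 (h8 t ht0 htk)
    · intro t ht0 htk htne
      rcases (by omega : t < k ∨ t = k) with h | h
      · exact h8 t ht0 h
      · omega
    · intro t ht0 htk htne
      exact h9 t ht0 htk
  · -- new second minimum at k
    refine ⟨h1, by omega, by omega, by omega, by omega, h6, rfl, ?_, ?_, ?_, ?_⟩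
    · intro t ht0 htk
      rcases (by omega : t < k ∨ t = k) with h | h
      · exact h8 t ht0 h
      · subst h; omega
    · intro t ht0 htk
      exact h9 t ht0 htk
    · intro t ht0 htk htne
      rcases (by omega : t < k ∨ t = k) with h | h
      · exact le_of_lt (lt_of_lt_of_le hv2 (h10 t ht0 h htne))
      · subst h; exact le_refl _
    · intro t ht0 htk htne
      exact lt_of_lt_of_le hv2 (h10 t ht0 htk htne)
  · -- state unchanged
    refine ⟨h1, by omega, h3, by omega, h5, h6, h7, ?_, h9, ?_, h11⟩
    · intro t ht0 htk
      rcases (by omega : t < k ∨ t = k) with h | h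
      · exact h8 t ht0 h
      · subst h; omega
    · intro t ht0 htk htne
      rcases (by omega : t < k ∨ t = k) with h | h
      · exact h10 t ht0 h htne
      · subst h; omega

lemma inv_final (xs : List Int) (h2 : 2 ≤ (xs.length : Int)) :
    InvB xs (xs.length : Int) (bState xs) := by
  have main : ∀ j : Nat, 2 + (j : Int) ≤ (xs.length : Int) →
      InvB xs (2 + (j : Int)) ((PySem.List.pyRange 2 (2 + (j : Int)) 1).foldl (bStep xs) (bInit xs)) := by
    intro j
    induction j with
    | zero =>
        intro h
        rw [PySem.List.pyRange_one_eq_nil (by norm_num)]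
        simpa using inv_init xs
    | succ j ih =>
        intro h
        have hcast : (2 + ((j + 1 : Nat) : Int)) = (2 + (j : Int)) + 1 := by push_cast; ring
        rw [hcast, PySem.List.pyRange_one_succ_right (by omega), List.foldl_append]
        simp only [List.foldl_cons, List.foldl_nil]
        exact inv_step xs (2 + (j : Int)) _ (ih (by omega))
  have h := main (xs.length - 2) (by omega)
  have heq : (2 + ((xs.length - 2 : Nat) : Int)) = (xs.length : Int) := by omega
  rw [heq] at h
  exact h

-- B in terms of bState (length ≥ 2)
lemma B_char (xs : List Int) (h2 : 2 ≤ (xs.length : Int)) :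
    rech_supsymb_alt xs =
      (if (bState xs).1 + (bState xs).2.2.1 < 1
       then ([min (bState xs).2.1 (bState xs).2.2.2, max (bState xs).2.1 (bState xs).2.2.2],
             (bState xs).1 + (bState xs).2.2.1)
       else ([0, 1], 1)) := by
  unfold rech_supsymb_alt bState bStep bInit gI
  dsimp only
  rw [if_neg (by omega)]

-- every admissible pair's sum is at least m1 + m2
lemma key_ge (xs : List Int) (st : Int × Int × Int × Int)
    (hInv : InvB xs (xs.length : Int) st) (i j : Int)
    (hi0 : 0 ≤ i) (hin : i < (xs.length : Int)) (hj0 : 0 ≤ j) (hjn : j < (xs.length : Int))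
    (hne : j ≠ i) : st.1 + st.2.2.1 ≤ gI xs i + gI xs j := by
  obtain ⟨h1, h2, h3, h4, h5, h6, h7, h8, h9, h10, h11⟩ := hInv
  by_cases hj : j = st.2.1
  · have hi : i ≠ st.2.1 := by rw [← hj]; exact fun h => hne h.symm
    have hgi := h10 i hi0 hin hi
    have hgj : gI xs j = st.1 := by rw [hj, ← h6]
    omega
  · have hgj := h10 j hj0 hjn hj
    have hgi := h8 i hi0 hin
    omega

-- ===== VERDICT (by name: the statement is the Claim_ definition above) =====
theorem rech_supsymb_spec : Claim_equal_rech_supsymb := by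
  intro xs _
  unfold Spec_rech_supsymb
  rcases Nat.lt_or_ge xs.length 2 with hlt | hge
  · -- length 0 or 1: no admissible pair on either side
    rcases (by omega : xs.length = 0 ∨ xs.length = 1) with h0 | h1
    · rcases List.length_eq_zero_iff.mp h0 with rfl
      rfl
    · rw [A_char xs (by omega), pvFold_none (fA xs) (tA xs) (cA xs) _ _ ?_]
      · simp [rech_supsymb_alt, (by omega : (xs.length : Int) < 2)]
      · intro q hq hc
        exfalso
        rw [h1] at hq
        have hq0 : q = 0 := by omega
        subst hq0
        simp only [cA, decide_eq_true_eq, h1] at hc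
        simp at hc
  · have h2 : 2 ≤ (xs.length : Int) := by omega
    have hn : 0 < xs.length := by omega
    have hInv := inv_final xs h2
    obtain ⟨hp10, hp1k, hp20, hp2k, hpne, hm1, hm2, hle1, hlt1, hle2, hlt2⟩ := inv_final xs h2
    rw [A_char xs hn, B_char xs h2]
    by_cases hS1 : (bState xs).1 + (bState xs).2.2.1 < 1
    · rw [if_pos hS1]
      -- positions of the two smallest values, as a sorted pair
      have hab : min (bState xs).2.1 (bState xs).2.2.2 < max (bState xs).2.1 (bState xs).2.2.2 :=
        min_lt_max.mpr hpne
      set a := min (bState xs).2.1 (bState xs).2.2.2 with ha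
      set b := max (bState xs).2.1 (bState xs).2.2.2 with hb
      have ha0 : 0 ≤ a := by omega
      have hbn : b < (xs.length : Int) := by
        rcases max_cases (bState xs).2.1 (bState xs).2.2.2 with ⟨h, _⟩ | ⟨h, _⟩ <;> omega
      have hAB : a.toNat < b.toNat := by omega
      have hBn : b.toNat < xs.length := by omega
      have hcastA : ((a.toNat : Nat) : Int) = a := Int.toNat_of_nonneg ha0
      have hcastB : ((b.toNat : Nat) : Int) = b := Int.toNat_of_nonneg (by omega)
      have hdiv : (a.toNat * xs.length + b.toNat) / xs.length = a.toNat := by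
        rw [Nat.add_comm, Nat.mul_comm, Nat.add_mul_div_left _ _ hn, Nat.div_eq_of_lt hBn]; omega
      have hmod : (a.toNat * xs.length + b.toNat) % xs.length = b.toNat := by
        rw [Nat.add_comm, Nat.mul_comm, Nat.add_mul_mod_self_left, Nat.mod_eq_of_lt hBn]
      -- the pair {a,b} is {p1,p2} and its sum is the tracked minimum sum
      have hsum : gI xs a + gI xs b = (bState xs).1 + (bState xs).2.2.1 := by
        rcases le_total (bState xs).2.1 (bState xs).2.2.2 with h | h
        · rw [ha, hb, min_eq_left h, max_eq_right h, ← hm1, ← hm2]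
        · rw [ha, hb, min_eq_right h, max_eq_left h, ← hm1, ← hm2]; ring
      rw [pvFold_first (fA xs) (tA xs) (cA xs) (xs.length * xs.length) (1, [0, 1])
            (a.toNat * xs.length + b.toNat) ?_ ?_ ?_ ?_ ?_]
      · simp only [fA, tA, hdiv, hmod, hcastA, hcastB, hsum]
      · -- within range
        have e1 : a.toNat * xs.length + b.toNat < (a.toNat + 1) * xs.length := by
          have e : (a.toNat + 1) * xs.length = a.toNat * xs.length + xs.length := by ring
          omega
        have e2 : (a.toNat + 1) * xs.length ≤ xs.length * xs.length :=
          Nat.mul_le_mul_right _ (by omega)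
        omega
      · simp only [cA, hdiv, hmod, decide_eq_true_eq]; omega
      · simp only [fA, hdiv, hmod, hcastA, hcastB, hsum]; exact hS1
      · -- global minimality
        intro q hq hc
        simp only [cA, decide_eq_true_eq] at hc
        have hiq : q / xs.length < xs.length := (Nat.div_lt_iff_lt_mul hn).mpr hq
        have hjq : q % xs.length < xs.length := Nat.mod_lt _ (by omega)
        have hkey := key_ge xs (bState xs) hInv ((q / xs.length : Nat) : Int) ((q % xs.length : Nat) : Int)
          (by positivity) (by exact_mod_cast hiq) (by positivity) (by exact_mod_cast hjq)
          (by exact_mod_cast hc)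
        simp only [fA, hdiv, hmod, hcastA, hcastB, hsum]
        exact hkey
      · -- strictly earlier pairs have strictly larger sums
        intro q hq hc
        simp only [cA, decide_eq_true_eq] at hc
        have hqid := Nat.div_add_mod q xs.length
        have hile : q / xs.length ≤ a.toNat := by
          have := Nat.div_le_div_right (c := xs.length) (le_of_lt hq)
          rw [hdiv] at this
          exact this
        have hjq : q % xs.length < xs.length := Nat.mod_lt _ (by omega)
        simp only [fA, hdiv, hmod, hcastA, hcastB, hsum]
        rcases Nat.lt_or_ge (q / xs.length) a.toNat with hi | hi
        · -- outer index strictly before a: its value is strictly above the second minimum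
          have hti : ((q / xs.length : Nat) : Int) < a := by omega
          have htine : ((q / xs.length : Nat) : Int) ≠ (bState xs).2.1 := by
            have : a ≤ (bState xs).2.1 := min_le_left _ _
            omega
          have hgi := hlt2 ((q / xs.length : Nat) : Int) (by positivity)
            (by have : a ≤ (bState xs).2.2.2 := min_le_right _ _; omega) htine
          have hgj := hle1 ((q % xs.length : Nat) : Int) (by positivity) (by exact_mod_cast hjq)
          omega
        · -- same outer index a, inner index strictly before b
          have hieq : q / xs.length = a.toNat := by omega
          have hjb : q % xs.length < b.toNat := by
            have e : xs.length * (q / xs.length) = (q / xs.length) * xs.length := by ring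
            rw [hieq] at hqid e
            omega
          have htj : ((q % xs.length : Nat) : Int) < b := by omega
          have hgia : gI xs ((q / xs.length : Nat) : Int) = gI xs a := by rw [hieq, hcastA]
          have htjne : ((q % xs.length : Nat) : Int) ≠ ((q / xs.length : Nat) : Int) := by
            exact_mod_cast hc
          rcases le_total (bState xs).2.1 (bState xs).2.2.2 with h | h
          · -- a = p1 < p2 = b : value at a is m1, inner value > m2
            have hae : a = (bState xs).2.1 := min_eq_left h
            have hbe : b = (bState xs).2.2.2 := max_eq_right h
            have hgj := hlt2 ((q % xs.length : Nat) : Int) (by positivity) (by omega)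
              (by rw [← hae]; rw [hieq, hcastA] at htjne; exact htjne)
            have : gI xs a = (bState xs).1 := by rw [hae, ← hm1]
            omega
          · -- a = p2 < p1 = b : value at a is m2, inner value > m1
            have hae : a = (bState xs).2.2.2 := min_eq_right h
            have hbe : b = (bState xs).2.1 := max_eq_left h
            have hgj := hlt1 ((q % xs.length : Nat) : Int) (by positivity) (by omega)
            have : gI xs a = (bState xs).2.2.1 := by rw [hae, ← hm2]
            omega
    · rw [if_neg hS1]
      rw [pvFold_none (fA xs) (tA xs) (cA xs) _ _ ?_]
      · intro q hq hc
        simp only [cA, decide_eq_true_eq] at hc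
        have hiq : q / xs.length < xs.length := (Nat.div_lt_iff_lt_mul hn).mpr hq
        have hjq : q % xs.length < xs.length := Nat.mod_lt _ (by omega)
        have hkey := key_ge xs (bState xs) hInv ((q / xs.length : Nat) : Int) ((q % xs.length : Nat) : Int)
          (by positivity) (by exact_mod_cast hiq) (by positivity) (by exact_mod_cast hjq)
          (by exact_mod_cast hc)
        simp only [fA]
        omega
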